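-- pv_equiv track=rewrite | github.com/standardbeagle/standardbeagle-tools | plugins/slop-mcp/scripts/generate-skills.py | suggest_activities
-- ===== SOURCE A (Python) =====
-- from typing import Any
--
-- def suggest_activities(server_name: str, tools: list[dict[str, Any]]) -> list[dict[str, str]]:
--     """Suggest activity skills based on server tools."""
--     suggestions = []
--
--     # Analyze tool names and descriptions to suggest activities
--     tool_names = [t.get("name", "").lower() for t in tools]
--     tool_descs = " ".join([t.get("description", "").lower() for t in tools])
--
--     # Figma-related
--     if "figma" in server_name.lower() or "design" in tool_descs:
--         suggestions.extend([
--             {"name": "create-component", "desc": "Create a code component from a Figma design"},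
--             {"name": "extract-styles", "desc": "Extract design tokens and CSS variables from Figma"},
--             {"name": "sync-design", "desc": "Sync design changes to existing code components"},
--             {"name": "screenshot-component", "desc": "Capture screenshots of Figma components"},
--         ])
--
--     # GitHub-related
--     if "github" in server_name.lower() or any("issue" in t or "pr" in t or "pull" in t for t in tool_names):
--         suggestions.extend([
--             {"name": "create-pr", "desc": "Create pull request with standard template"},
--             {"name": "review-pr", "desc": "Review and comment on pull requests"},
--             {"name": "manage-issues", "desc": "Batch create, update, or close issues"},
--             {"name": "sync-labels", "desc": "Synchronize labels across repositories"},
--         ])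
--
--     # Filesystem-related
--     if "filesystem" in server_name.lower() or any("read" in t or "write" in t or "file" in t for t in tool_names):
--         suggestions.extend([
--             {"name": "batch-rename", "desc": "Rename multiple files with patterns"},
--             {"name": "find-replace", "desc": "Find and replace text across files"},
--             {"name": "organize-files", "desc": "Organize files by type, date, or custom rules"},
--         ])
--
--     # Database-related
--     if any("query" in t or "sql" in t or "database" in t for t in tool_names):
--         suggestions.extend([
--             {"name": "run-migration", "desc": "Run database migrations safely"},
--             {"name": "backup-data", "desc": "Backup specific tables or datasets"},
--             {"name": "analyze-schema", "desc": "Analyze and document database schema"},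
--         ])
--
--     # Code search/analysis
--     if "lci" in server_name.lower() or "search" in tool_descs:
--         suggestions.extend([
--             {"name": "find-usages", "desc": "Find all usages of a function or symbol"},
--             {"name": "analyze-dependencies", "desc": "Analyze code dependencies"},
--             {"name": "find-dead-code", "desc": "Find unused functions and exports"},
--         ])
--
--     # Generic suggestions if no specific matches
--     if not suggestions:
--         suggestions.extend([
--             {"name": "batch-operation", "desc": "Run operations on multiple items"},
--             {"name": "generate-report", "desc": "Generate a summary report"},
--             {"name": "validate-data", "desc": "Validate data against rules"},
--         ])
--
--     return suggestions
-- ===== SOURCE B (Python) =====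
-- from typing import Any
--
-- # keyword -> category indexes; the output is reassembled from matched categories
-- SERVER_KEYWORDS = {"figma": "figma", "github": "github", "filesystem": "fs", "lci": "search"}
-- DESC_KEYWORDS = {"design": "figma", "search": "search"}
-- NAME_KEYWORDS = {
--     "issue": "github", "pr": "github", "pull": "github",
--     "read": "fs", "write": "fs", "file": "fs",
--     "query": "db", "sql": "db", "database": "db",
-- }
-- CATEGORY_ORDER = ["figma", "github", "fs", "db", "search"]
-- SUGGESTIONS = {
--     "figma": [
--         {"name": "create-component", "desc": "Create a code component from a Figma design"},
--         {"name": "extract-styles", "desc": "Extract design tokens and CSS variables from Figma"},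
--         {"name": "sync-design", "desc": "Sync design changes to existing code components"},
--         {"name": "screenshot-component", "desc": "Capture screenshots of Figma components"},
--     ],
--     "github": [
--         {"name": "create-pr", "desc": "Create pull request with standard template"},
--         {"name": "review-pr", "desc": "Review and comment on pull requests"},
--         {"name": "manage-issues", "desc": "Batch create, update, or close issues"},
--         {"name": "sync-labels", "desc": "Synchronize labels across repositories"},
--     ],
--     "fs": [
--         {"name": "batch-rename", "desc": "Rename multiple files with patterns"},
--         {"name": "find-replace", "desc": "Find and replace text across files"},
--         {"name": "organize-files", "desc": "Organize files by type, date, or custom rules"},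
--     ],
--     "db": [
--         {"name": "run-migration", "desc": "Run database migrations safely"},
--         {"name": "backup-data", "desc": "Backup specific tables or datasets"},
--         {"name": "analyze-schema", "desc": "Analyze and document database schema"},
--     ],
--     "search": [
--         {"name": "find-usages", "desc": "Find all usages of a function or symbol"},
--         {"name": "analyze-dependencies", "desc": "Analyze code dependencies"},
--         {"name": "find-dead-code", "desc": "Find unused functions and exports"},
--     ],
-- }
-- GENERIC = [
--     {"name": "batch-operation", "desc": "Run operations on multiple items"},
--     {"name": "generate-report", "desc": "Generate a summary report"},
--     {"name": "validate-data", "desc": "Validate data against rules"},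
-- ]
--
--
-- def suggest_activities(server_name: str, tools: list[dict[str, Any]]) -> list[dict[str, str]]:
--     """Suggest activity skills: index keywords to categories, collect matched
--     categories in a set, then emit the suggestions in canonical category order."""
--     srv = server_name.lower()
--     matched = set()
--     for kw, cat in SERVER_KEYWORDS.items():
--         if kw in srv:
--             matched.add(cat)
--     descs = " ".join(t.get("description", "").lower() for t in tools)
--     for kw, cat in DESC_KEYWORDS.items():
--         if kw in descs:
--             matched.add(cat)
--     for t in tools:
--         name = t.get("name", "").lower()
--         for kw, cat in NAME_KEYWORDS.items():
--             if kw in name: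
--                 matched.add(cat)
--     out = [s for cat in CATEGORY_ORDER if cat in matched for s in SUGGESTIONS[cat]]
--     return out or list(GENERIC)
-- ===== Notes on version B (the rewrite author's own statement) =====
-- stated objective: alternative
-- what changed: A's five hard-coded if/extend branch blocks are inverted into keyword-to-category index tables (server-name, description and tool-name keywords each mapping to a category): matched categories are collected into a set and the output is reassembled from a category-to-suggestions table in canonical order, with the generic fallback when the set matched nothing.
import Mathlib
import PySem

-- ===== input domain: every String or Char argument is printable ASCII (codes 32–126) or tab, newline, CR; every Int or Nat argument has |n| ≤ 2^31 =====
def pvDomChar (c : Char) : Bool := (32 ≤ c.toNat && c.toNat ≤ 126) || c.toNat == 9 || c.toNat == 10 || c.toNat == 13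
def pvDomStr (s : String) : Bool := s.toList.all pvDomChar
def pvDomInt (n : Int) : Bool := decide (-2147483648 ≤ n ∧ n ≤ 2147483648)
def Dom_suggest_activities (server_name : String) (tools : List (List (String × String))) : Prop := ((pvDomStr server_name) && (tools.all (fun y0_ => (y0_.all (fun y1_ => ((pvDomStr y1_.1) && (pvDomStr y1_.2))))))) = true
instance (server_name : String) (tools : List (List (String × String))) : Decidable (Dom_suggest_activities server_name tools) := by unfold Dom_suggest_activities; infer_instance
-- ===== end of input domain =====

-- B inverts A's five hard-coded branch blocks into keyword→category index tables: it
-- collects the matched categories into a set and reassembles the output from the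
-- category tables in canonical order; objective: alternative structure, same cost.

-- shared literal suggestion lists (pure data, used by both ports)
def pvFigma : List (List (String × String)) :=
  [[("name", "create-component"), ("desc", "Create a code component from a Figma design")],
   [("name", "extract-styles"), ("desc", "Extract design tokens and CSS variables from Figma")],
   [("name", "sync-design"), ("desc", "Sync design changes to existing code components")],
   [("name", "screenshot-component"), ("desc", "Capture screenshots of Figma components")]]
def pvGithub : List (List (String × String)) :=
  [[("name", "create-pr"), ("desc", "Create pull request with standard template")],
   [("name", "review-pr"), ("desc", "Review and comment on pull requests")],
   [("name", "manage-issues"), ("desc", "Batch create, update, or close issues")],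
   [("name", "sync-labels"), ("desc", "Synchronize labels across repositories")]]
def pvFilesystem : List (List (String × String)) :=
  [[("name", "batch-rename"), ("desc", "Rename multiple files with patterns")],
   [("name", "find-replace"), ("desc", "Find and replace text across files")],
   [("name", "organize-files"), ("desc", "Organize files by type, date, or custom rules")]]
def pvDatabase : List (List (String × String)) :=
  [[("name", "run-migration"), ("desc", "Run database migrations safely")],
   [("name", "backup-data"), ("desc", "Backup specific tables or datasets")],
   [("name", "analyze-schema"), ("desc", "Analyze and document database schema")]]
def pvSearch : List (List (String × String)) :=
  [[("name", "find-usages"), ("desc", "Find all usages of a function or symbol")],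
   [("name", "analyze-dependencies"), ("desc", "Analyze code dependencies")],
   [("name", "find-dead-code"), ("desc", "Find unused functions and exports")]]
def pvGeneric : List (List (String × String)) :=
  [[("name", "batch-operation"), ("desc", "Run operations on multiple items")],
   [("name", "generate-report"), ("desc", "Generate a summary report")],
   [("name", "validate-data"), ("desc", "Validate data against rules")]]

-- ===== PORT A =====
def suggest_activities (server_name : String) (tools : List (List (String × String))) : List (List (String × String)) :=
  let tool_names := tools.map (fun t => PySem.Str.lower (((t.lookup "name").getD "")))
  let tool_descs := PySem.Str.join " " (tools.map (fun t => PySem.Str.lower (((t.lookup "description").getD ""))))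
  let suggestions : List (List (String × String)) := []
  let suggestions := if PySem.Str.isIn "figma" (PySem.Str.lower server_name) || PySem.Str.isIn "design" tool_descs
    then suggestions ++ pvFigma else suggestions
  let suggestions := if PySem.Str.isIn "github" (PySem.Str.lower server_name) || tool_names.any (fun t => PySem.Str.isIn "issue" t || PySem.Str.isIn "pr" t || PySem.Str.isIn "pull" t)
    then suggestions ++ pvGithub else suggestions
  let suggestions := if PySem.Str.isIn "filesystem" (PySem.Str.lower server_name) || tool_names.any (fun t => PySem.Str.isIn "read" t || PySem.Str.isIn "write" t || PySem.Str.isIn "file" t)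
    then suggestions ++ pvFilesystem else suggestions
  let suggestions := if tool_names.any (fun t => PySem.Str.isIn "query" t || PySem.Str.isIn "sql" t || PySem.Str.isIn "database" t)
    then suggestions ++ pvDatabase else suggestions
  let suggestions := if PySem.Str.isIn "lci" (PySem.Str.lower server_name) || PySem.Str.isIn "search" tool_descs
    then suggestions ++ pvSearch else suggestions
  let suggestions := if suggestions.isEmpty then suggestions ++ pvGeneric else suggestions
  suggestions

-- ===== PORT B =====
-- keyword → category index tables (Source B's SERVER_KEYWORDS / DESC_KEYWORDS / NAME_KEYWORDS)
def pvServerKw : List (String × String) :=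
  [("figma", "figma"), ("github", "github"), ("filesystem", "fs"), ("lci", "search")]
def pvDescKw : List (String × String) := [("design", "figma"), ("search", "search")]
def pvNameKw : List (String × String) :=
  [("issue", "github"), ("pr", "github"), ("pull", "github"),
   ("read", "fs"), ("write", "fs"), ("file", "fs"),
   ("query", "db"), ("sql", "db"), ("database", "db")]
def pvOrder : List String := ["figma", "github", "fs", "db", "search"]
def pvSuggestions : List (String × List (List (String × String))) :=
  [("figma", pvFigma), ("github", pvGithub), ("fs", pvFilesystem), ("db", pvDatabase), ("search", pvSearch)]

def suggest_activities_alt (server_name : String) (tools : List (List (String × String))) : List (List (String × String)) :=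
  let srv := PySem.Str.lower server_name
  let matched : PySem.Set String := PySem.Set.empty
  let matched := pvServerKw.foldl (fun m kc => if PySem.Str.isIn kc.1 srv then PySem.Set.add m kc.2 else m) matched
  let descs := PySem.Str.join " " (tools.map (fun t => PySem.Str.lower (((t.lookup "description").getD ""))))
  let matched := pvDescKw.foldl (fun m kc => if PySem.Str.isIn kc.1 descs then PySem.Set.add m kc.2 else m) matched
  let matched := tools.foldl (fun m t =>
      pvNameKw.foldl (fun m kc => if PySem.Str.isIn kc.1 (PySem.Str.lower (((t.lookup "name").getD ""))) then PySem.Set.add m kc.2 else m) m) matched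
  let out := (pvOrder.filter (fun c => PySem.Set.contains matched c)).flatMap (fun c => (pvSuggestions.lookup c).getD [])
  if out.isEmpty then pvGeneric else out

-- ===== PRECONDITION & SPEC =====
def Spec_suggest_activities (server_name : String) (tools : List (List (String × String))) (out : List (List (String × String))) : Prop := out = suggest_activities_alt server_name tools
instance (server_name : String) (tools : List (List (String × String))) (out : List (List (String × String))) : Decidable (Spec_suggest_activities server_name tools out) := by unfold Spec_suggest_activities; infer_instance

-- ===== CLAIM =====
def Claim_equal_suggest_activities : Prop := ∀ (server_name : String) (tools : List (List (String × String))), Dom_suggest_activities server_name tools → Spec_suggest_activities server_name tools (suggest_activities server_name tools)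

-- ===== LEMMAS AND PROOFS =====

-- membership after a guarded-add fold over a keyword table
theorem pv_mem_kwfold (l : List (String × String)) (q : String × String → Bool) (m : List String) (x : String) :
    (x ∈ l.foldl (fun m kc => if q kc then PySem.Set.add m kc.2 else m) m) ↔
      x ∈ m ∨ l.any (fun kc => q kc && kc.2 == x) = true := by
  induction l generalizing m with
  | nil => simp
  | cons kc l ih =>
    simp only [List.foldl_cons, List.any_cons, ih]
    by_cases h : q kc = true <;>
      simp [h, PySem.Set.mem_add] <;> tauto

-- membership after the per-tool fold over the name-keyword table
theorem pv_mem_toolfold (tools : List (List (String × String))) (m : List String) (x : String) :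
    (x ∈ tools.foldl (fun m t =>
        pvNameKw.foldl (fun m kc => if PySem.Str.isIn kc.1 (PySem.Str.lower (((t.lookup "name").getD ""))) then PySem.Set.add m kc.2 else m) m) m) ↔
      x ∈ m ∨ tools.any (fun t => pvNameKw.any (fun kc =>
        PySem.Str.isIn kc.1 (PySem.Str.lower (((t.lookup "name").getD ""))) && kc.2 == x)) = true := by
  induction tools generalizing m with
  | nil => simp
  | cons t ts ih =>
    rw [List.foldl_cons, ih,
      pv_mem_kwfold _ (fun kc => PySem.Str.isIn kc.1 (PySem.Str.lower (((t.lookup "name").getD ""))))]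
    simp only [List.any_cons, Bool.or_eq_true]
    tauto

-- the filtered category scan evaluated on the concrete order list
theorem pv_filter_eval (g : String → Bool) :
    (pvOrder.filter g).flatMap (fun c => (pvSuggestions.lookup c).getD []) =
      (if g "figma" then pvFigma else []) ++ (if g "github" then pvGithub else []) ++
      (if g "fs" then pvFilesystem else []) ++ (if g "db" then pvDatabase else []) ++
      (if g "search" then pvSearch else []) := by
  cases h1 : g "figma" <;> cases h2 : g "github" <;> cases h3 : g "fs" <;>
    cases h4 : g "db" <;> cases h5 : g "search" <;>
    simp [pvOrder, pvSuggestions, List.filter, List.lookup, h1, h2, h3, h4, h5]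

-- ===== VERDICT =====
set_option maxHeartbeats 4000000 in
theorem suggest_activities_spec : Claim_equal_suggest_activities := by
  intro sn tools _
  unfold Spec_suggest_activities
  simp only [suggest_activities, suggest_activities_alt]
  rw [pv_filter_eval]
  have hmem : ∀ x : String,
      (x ∈ tools.foldl (fun m t =>
          pvNameKw.foldl (fun m kc => if PySem.Str.isIn kc.1 (PySem.Str.lower (((t.lookup "name").getD ""))) then PySem.Set.add m kc.2 else m) m)
        (pvDescKw.foldl (fun m kc => if PySem.Str.isIn kc.1 (PySem.Str.join " " (tools.map (fun t => PySem.Str.lower (((t.lookup "description").getD ""))))) then PySem.Set.add m kc.2 else m)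
          (pvServerKw.foldl (fun m kc => if PySem.Str.isIn kc.1 (PySem.Str.lower sn) then PySem.Set.add m kc.2 else m) PySem.Set.empty))) ↔
      (pvServerKw.any (fun kc => PySem.Str.isIn kc.1 (PySem.Str.lower sn) && kc.2 == x) = true ∨
       pvDescKw.any (fun kc => PySem.Str.isIn kc.1 (PySem.Str.join " " (tools.map (fun t => PySem.Str.lower (((t.lookup "description").getD ""))))) && kc.2 == x) = true ∨
       tools.any (fun t => pvNameKw.any (fun kc => PySem.Str.isIn kc.1 (PySem.Str.lower (((t.lookup "name").getD ""))) && kc.2 == x)) = true) := by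
    intro x
    rw [pv_mem_toolfold,
      pv_mem_kwfold _ (fun kc => PySem.Str.isIn kc.1 (PySem.Str.join " " (tools.map (fun t => PySem.Str.lower (((t.lookup "description").getD "")))))),
      pv_mem_kwfold _ (fun kc => PySem.Str.isIn kc.1 (PySem.Str.lower sn))]
    simp [PySem.Set.empty]
    exact or_assoc
  have h1 : PySem.Set.contains (tools.foldl (fun m t =>
          pvNameKw.foldl (fun m kc => if PySem.Str.isIn kc.1 (PySem.Str.lower (((t.lookup "name").getD ""))) then PySem.Set.add m kc.2 else m) m)
        (pvDescKw.foldl (fun m kc => if PySem.Str.isIn kc.1 (PySem.Str.join " " (tools.map (fun t => PySem.Str.lower (((t.lookup "description").getD ""))))) then PySem.Set.add m kc.2 else m)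
          (pvServerKw.foldl (fun m kc => if PySem.Str.isIn kc.1 (PySem.Str.lower sn) then PySem.Set.add m kc.2 else m) PySem.Set.empty))) "figma"
      = (PySem.Str.isIn "figma" (PySem.Str.lower sn) || PySem.Str.isIn "design" (PySem.Str.join " " (tools.map (fun t => PySem.Str.lower (((t.lookup "description").getD "")))))) := by
    rw [Bool.eq_iff_iff, PySem.Set.contains_iff, hmem]
    simp [pvServerKw, pvDescKw, pvNameKw]
  have h2 : PySem.Set.contains (tools.foldl (fun m t =>
          pvNameKw.foldl (fun m kc => if PySem.Str.isIn kc.1 (PySem.Str.lower (((t.lookup "name").getD ""))) then PySem.Set.add m kc.2 else m) m)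
        (pvDescKw.foldl (fun m kc => if PySem.Str.isIn kc.1 (PySem.Str.join " " (tools.map (fun t => PySem.Str.lower (((t.lookup "description").getD ""))))) then PySem.Set.add m kc.2 else m)
          (pvServerKw.foldl (fun m kc => if PySem.Str.isIn kc.1 (PySem.Str.lower sn) then PySem.Set.add m kc.2 else m) PySem.Set.empty))) "github"
      = (PySem.Str.isIn "github" (PySem.Str.lower sn) || (tools.map (fun t => PySem.Str.lower (((t.lookup "name").getD "")))).any (fun t => PySem.Str.isIn "issue" t || PySem.Str.isIn "pr" t || PySem.Str.isIn "pull" t)) := by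
    rw [Bool.eq_iff_iff, PySem.Set.contains_iff, hmem]
    simp [pvServerKw, pvDescKw, pvNameKw, List.any_map, Function.comp, or_assoc]
  have h3 : PySem.Set.contains (tools.foldl (fun m t =>
          pvNameKw.foldl (fun m kc => if PySem.Str.isIn kc.1 (PySem.Str.lower (((t.lookup "name").getD ""))) then PySem.Set.add m kc.2 else m) m)
        (pvDescKw.foldl (fun m kc => if PySem.Str.isIn kc.1 (PySem.Str.join " " (tools.map (fun t => PySem.Str.lower (((t.lookup "description").getD ""))))) then PySem.Set.add m kc.2 else m)
          (pvServerKw.foldl (fun m kc => if PySem.Str.isIn kc.1 (PySem.Str.lower sn) then PySem.Set.add m kc.2 else m) PySem.Set.empty))) "fs"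
      = (PySem.Str.isIn "filesystem" (PySem.Str.lower sn) || (tools.map (fun t => PySem.Str.lower (((t.lookup "name").getD "")))).any (fun t => PySem.Str.isIn "read" t || PySem.Str.isIn "write" t || PySem.Str.isIn "file" t)) := by
    rw [Bool.eq_iff_iff, PySem.Set.contains_iff, hmem]
    simp [pvServerKw, pvDescKw, pvNameKw, List.any_map, Function.comp, or_assoc]
  have h4 : PySem.Set.contains (tools.foldl (fun m t =>
          pvNameKw.foldl (fun m kc => if PySem.Str.isIn kc.1 (PySem.Str.lower (((t.lookup "name").getD ""))) then PySem.Set.add m kc.2 else m) m)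
        (pvDescKw.foldl (fun m kc => if PySem.Str.isIn kc.1 (PySem.Str.join " " (tools.map (fun t => PySem.Str.lower (((t.lookup "description").getD ""))))) then PySem.Set.add m kc.2 else m)
          (pvServerKw.foldl (fun m kc => if PySem.Str.isIn kc.1 (PySem.Str.lower sn) then PySem.Set.add m kc.2 else m) PySem.Set.empty))) "db"
      = ((tools.map (fun t => PySem.Str.lower (((t.lookup "name").getD "")))).any (fun t => PySem.Str.isIn "query" t || PySem.Str.isIn "sql" t || PySem.Str.isIn "database" t)) := by
    rw [Bool.eq_iff_iff, PySem.Set.contains_iff, hmem]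
    simp [pvServerKw, pvDescKw, pvNameKw, List.any_map, Function.comp, or_assoc]
  have h5 : PySem.Set.contains (tools.foldl (fun m t =>
          pvNameKw.foldl (fun m kc => if PySem.Str.isIn kc.1 (PySem.Str.lower (((t.lookup "name").getD ""))) then PySem.Set.add m kc.2 else m) m)
        (pvDescKw.foldl (fun m kc => if PySem.Str.isIn kc.1 (PySem.Str.join " " (tools.map (fun t => PySem.Str.lower (((t.lookup "description").getD ""))))) then PySem.Set.add m kc.2 else m)
          (pvServerKw.foldl (fun m kc => if PySem.Str.isIn kc.1 (PySem.Str.lower sn) then PySem.Set.add m kc.2 else m) PySem.Set.empty))) "search"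
      = (PySem.Str.isIn "lci" (PySem.Str.lower sn) || PySem.Str.isIn "search" (PySem.Str.join " " (tools.map (fun t => PySem.Str.lower (((t.lookup "description").getD "")))))) := by
    rw [Bool.eq_iff_iff, PySem.Set.contains_iff, hmem]
    simp [pvServerKw, pvDescKw, pvNameKw]
  simp only [h1, h2, h3, h4, h5]
  generalize (PySem.Str.isIn "figma" (PySem.Str.lower sn) || PySem.Str.isIn "design" (PySem.Str.join " " (tools.map (fun t => PySem.Str.lower (((t.lookup "description").getD "")))))) = c1
  generalize (PySem.Str.isIn "github" (PySem.Str.lower sn) || (tools.map (fun t => PySem.Str.lower (((t.lookup "name").getD "")))).any (fun t => PySem.Str.isIn "issue" t || PySem.Str.isIn "pr" t || PySem.Str.isIn "pull" t)) = c2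
  generalize (PySem.Str.isIn "filesystem" (PySem.Str.lower sn) || (tools.map (fun t => PySem.Str.lower (((t.lookup "name").getD "")))).any (fun t => PySem.Str.isIn "read" t || PySem.Str.isIn "write" t || PySem.Str.isIn "file" t)) = c3
  generalize ((tools.map (fun t => PySem.Str.lower (((t.lookup "name").getD "")))).any (fun t => PySem.Str.isIn "query" t || PySem.Str.isIn "sql" t || PySem.Str.isIn "database" t)) = c4
  generalize (PySem.Str.isIn "lci" (PySem.Str.lower sn) || PySem.Str.isIn "search" (PySem.Str.join " " (tools.map (fun t => PySem.Str.lower (((t.lookup "description").getD "")))))) = c5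
  cases c1 <;> cases c2 <;> cases c3 <;> cases c4 <;> cases c5 <;> rfl
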